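-- pv_equiv track=rewrite | github.com/AlejandroRuF/1DAM_EntornosDeDesarrollo | 1ºEVAL/Examen/Act1.py | comprobar
-- ===== SOURCE A (Python) =====
-- def vocal(caracter):
--     vocales = "aeiouAEIOU"
--     if caracter in vocales:
--         return True
--     else:
--         return False
--
-- def digito(caracter):
--     digitosok = "12345"
--     if caracter in digitosok:
--         return True
--     else:
--         return False
--
-- def simbolo(caracter):
--     simbolos = "$%&"
--     if caracter in simbolos:
--         return True
--     else:
--         return False
--
-- def comprobar(cadena):
--     vocalok = True
--     digitok = True
--     simbolook = True
--     for i in range(0, len(cadena), 3):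
--         if not vocal(cadena[i]):
--             vocalok = False
--     for i in range(1, len(cadena), 3):
--         if not digito(cadena[i]):
--             digitok = False
--     for i in range(2, len(cadena), 3):
--         if not simbolo(cadena[i]):
--             simbolook = False
--
--     if vocalok and digitok and simbolook:
--         return True
--     else:
--         return False
-- ===== SOURCE B (Python) =====
-- def comprobar(cadena):
--     for i, c in enumerate(cadena):
--         k = i % 3
--         if k == 0:
--             if c not in "aeiouAEIOU":
--                 return False
--         elif k == 1:
--             if c not in "12345":
--                 return False
--         else:
--             if c not in "$%&":
--                 return False
--     return True
-- ===== Notes on version B (the rewrite author's own statement) =====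
-- stated objective: faster
-- what changed: replaces A's three strided passes (each scanning every 3rd character and latching a separate boolean, combined at the end) with a single in-order enumerate loop that picks the membership test by i % 3 and returns False at the first failing character
import Mathlib
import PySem

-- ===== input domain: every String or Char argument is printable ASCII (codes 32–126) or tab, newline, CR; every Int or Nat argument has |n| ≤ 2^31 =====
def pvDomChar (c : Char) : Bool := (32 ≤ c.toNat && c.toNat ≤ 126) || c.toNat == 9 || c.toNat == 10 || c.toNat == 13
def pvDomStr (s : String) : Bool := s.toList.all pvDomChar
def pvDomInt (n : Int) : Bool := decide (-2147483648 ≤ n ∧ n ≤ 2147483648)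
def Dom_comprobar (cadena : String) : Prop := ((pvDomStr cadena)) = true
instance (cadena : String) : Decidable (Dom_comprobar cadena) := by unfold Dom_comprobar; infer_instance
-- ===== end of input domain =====

-- B replaces A's three strided passes with one in-order loop selecting the check by i % 3 (early exit); same results, simpler single-state traversal.


-- ===== PORT A =====
-- 'caracter in vocales' is ported as list membership over the string's characters (exact for these ASCII literals)
def vocal (caracter : Char) : Bool :=
  if caracter ∈ "aeiouAEIOU".toList then true else false

def digito (caracter : Char) : Bool :=
  if caracter ∈ "12345".toList then true else false

def simbolo (caracter : Char) : Bool :=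
  if caracter ∈ "$%&".toList then true else false

def comprobar (cadena : String) : Bool :=
  let vocalok := (PySem.List.pyRange 0 cadena.toList.length 3).foldl
    (fun acc i => if ¬ vocal ((PySem.Str.pyGet? cadena i).getD ' ') then false else acc) true
  let digitok := (PySem.List.pyRange 1 cadena.toList.length 3).foldl
    (fun acc i => if ¬ digito ((PySem.Str.pyGet? cadena i).getD ' ') then false else acc) true
  let simbolook := (PySem.List.pyRange 2 cadena.toList.length 3).foldl
    (fun acc i => if ¬ simbolo ((PySem.Str.pyGet? cadena i).getD ' ') then false else acc) true
  if vocalok && digitok && simbolook then true else false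

-- ===== PORT B =====
-- B's per-position check, selected by i % 3
def checkB (k : Nat) (c : Char) : Bool :=
  if k = 0 then decide (c ∈ "aeiouAEIOU".toList)
  else if k = 1 then decide (c ∈ "12345".toList)
  else decide (c ∈ "$%&".toList)

-- B's single loop: early-return false at the first failing character
def bloop (i : Nat) : List Char → Bool
  | [] => true
  | c :: rest => if checkB (i % 3) c then bloop (i + 1) rest else false

def comprobar_alt (cadena : String) : Bool := bloop 0 cadena.toList

-- ===== PRECONDITION & SPEC =====
def Spec_comprobar (cadena : String) (out : Bool) : Prop := out = comprobar_alt cadena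
instance (cadena : String) (out : Bool) : Decidable (Spec_comprobar cadena out) := by unfold Spec_comprobar; infer_instance

-- ===== CLAIM (what is proved, stated in full; the proofs are below) =====
def Claim_equal_comprobar : Prop := ∀ (cadena : String), Dom_comprobar cadena → Spec_comprobar cadena (comprobar cadena)

-- ===== LEMMAS AND PROOFS =====

theorem if_tf (b : Bool) : (if b then true else false) = b := by cases b <;> simp

-- A's latch-fold over a list equals "initial state && every element passes"
theorem foldl_latch (p : Int → Bool) (l : List Int) (b : Bool) :
    l.foldl (fun acc i => if ¬ p i then false else acc) b = (b && l.all p) := by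
  induction l generalizing b with
  | nil => simp
  | cons x xs ih =>
      simp only [List.foldl_cons, List.all_cons, ih]
      by_cases h : p x = true <;> simp [h]

-- B's loop tests every position j against checkB ((i+j) % 3)
theorem bloop_iff (cs : List Char) (i : Nat) :
    bloop i cs = true ↔ ∀ j, j < cs.length → checkB ((i + j) % 3) (cs.getD j ' ') = true := by
  induction cs generalizing i with
  | nil => simp [bloop]
  | cons c rest ih =>
      simp only [bloop]
      by_cases h : checkB (i % 3) c = true
      · simp only [h, if_true, ih]
        constructor
        · intro H j hj
          cases j with
          | zero => simpa using h
          | succ j' =>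
              have := H j' (by simpa using Nat.lt_of_succ_lt_succ hj)
              simpa [Nat.add_comm, Nat.add_assoc, Nat.add_left_comm] using this
        · intro H j hj
          have := H (j + 1) (by simpa using Nat.succ_lt_succ hj)
          simpa [Nat.add_comm, Nat.add_assoc, Nat.add_left_comm] using this
      · simp only [h]
        constructor
        · intro H; exact absurd H (by simp)
        · intro H
          exact absurd (by simpa using H 0 (by simp)) h

-- character access bridge: for 0 ≤ i < len, A's pyGet?-then-default is getD at i.toNat
theorem pyGet_getD (cadena : String) (i : Int) (h0 : 0 ≤ i) (h1 : i < cadena.toList.length) :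
    (PySem.Str.pyGet? cadena i).getD ' ' = cadena.toList.getD i.toNat ' ' := by
  obtain ⟨n, rfl⟩ := Int.eq_ofNat_of_zero_le h0
  rw [PySem.Str.pyGet?_natCast]
  simp [List.getD]

theorem comprobar_spec_aux (cadena : String) : comprobar cadena = comprobar_alt cadena := by
  rw [Bool.eq_iff_iff]
  unfold comprobar comprobar_alt
  simp only [foldl_latch, Bool.true_and]
  rw [bloop_iff]
  have hmem : ∀ a : Int, ∀ x : Int, x ∈ PySem.List.pyRange a cadena.toList.length 3 ↔
      a ≤ x ∧ x < cadena.toList.length ∧ (3 : Int) ∣ x - a := fun a x =>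
    PySem.List.mem_pyRange_iff_of_pos (by norm_num) x
  simp only [if_tf]
  simp only [Bool.and_eq_true, List.all_eq_true]
  constructor
  · rintro ⟨⟨hv, hd⟩, hs⟩ j hj
    have hjn : (j : Int) < cadena.toList.length := by exact_mod_cast hj
    have h3' : j % 3 = 0 ∨ j % 3 = 1 ∨ j % 3 = 2 := by omega
    rcases h3' with h3 | h3 | h3
    · have := hv (j : Int) ((hmem 0 j).mpr ⟨by positivity, hjn, by omega⟩)
      rw [pyGet_getD _ _ (by positivity) hjn] at this
      simpa [checkB, h3, vocal, Int.toNat_natCast] using this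
    · have := hd (j : Int) ((hmem 1 j).mpr ⟨by omega, hjn, by omega⟩)
      rw [pyGet_getD _ _ (by positivity) hjn] at this
      simpa [checkB, h3, digito, Int.toNat_natCast] using this
    · have := hs (j : Int) ((hmem 2 j).mpr ⟨by omega, hjn, by omega⟩)
      rw [pyGet_getD _ _ (by positivity) hjn] at this
      simpa [checkB, h3, simbolo, Int.toNat_natCast] using this
  · intro H
    refine ⟨⟨?_, ?_⟩, ?_⟩
    · intro x hx
      obtain ⟨h0, h1, h2⟩ := (hmem 0 x).mp hx
      have hj : x.toNat < cadena.toList.length := by omega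
      have hm : x.toNat % 3 = 0 := by omega
      have := H x.toNat hj
      rw [pyGet_getD _ _ h0 h1]
      simpa [checkB, hm, vocal] using this
    · intro x hx
      obtain ⟨h0, h1, h2⟩ := (hmem 1 x).mp hx
      have hj : x.toNat < cadena.toList.length := by omega
      have hm : x.toNat % 3 = 1 := by omega
      have := H x.toNat hj
      rw [pyGet_getD _ _ (by omega) h1]
      simpa [checkB, hm, digito] using this
    · intro x hx
      obtain ⟨h0, h1, h2⟩ := (hmem 2 x).mp hx
      have hj : x.toNat < cadena.toList.length := by omega
      have hm : x.toNat % 3 = 2 := by omega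
      have := H x.toNat hj
      rw [pyGet_getD _ _ (by omega) h1]
      simpa [checkB, hm, simbolo] using this

-- ===== VERDICT (by name: the statement is the Claim_ definition above) =====
theorem comprobar_spec : Claim_equal_comprobar := by
  intro cadena _
  exact comprobar_spec_aux cadena
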